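-- pv_equiv track=rewrite | github.com/Lennolium/swiftGuard | src/swiftguard/core/helper.py | _remove_redundancy
-- ===== SOURCE A (Python) =====
-- def _remove_redundancy(paths: list[str]) -> list[str]:
--     """
--     Removes redundant paths from the list.
--
--     Example:
--     If a directory and one or more files within that directory are
--     provided, the files are removed since the directory already
--     contains all the files.
--
--     :param paths: List of paths.
--     :type paths: list[str]
--     :return: Cleaned list of paths without redundancies.
--     :rtype: list[str]
--     """
--
--     cleaned_paths = []
--     for path in paths:
--         if not any(
--                 other != path
--                 and path.startswith(other)
--                 for other in paths
--                 ):
--             cleaned_paths.append(path)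
--
--     return cleaned_paths
-- ===== SOURCE B (Python) =====
-- def _remove_redundancy(paths: list[str]) -> list[str]:
--     """Keep a path iff no proper string prefix of it occurs in the list.
--
--     One hash set of all paths is built once; each path is then tested by
--     looking up its proper prefixes in the set, so the quadratic inner scan
--     over the whole list disappears.
--     """
--     present = set(paths)
--     return [
--         p for p in paths
--         if not any(p[:k] in present for k in range(len(p)))
--     ]
-- ===== Notes on version B (the rewrite author's own statement) =====
-- stated objective: faster
-- what changed: Instead of scanning the whole list for a prefix of each path (O(n^2*L)), B builds one hash set of all paths and tests, for each path, whether any of its proper prefixes is in the set (O(n*L^2) with O(1)-expected lookups).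
import Mathlib
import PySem

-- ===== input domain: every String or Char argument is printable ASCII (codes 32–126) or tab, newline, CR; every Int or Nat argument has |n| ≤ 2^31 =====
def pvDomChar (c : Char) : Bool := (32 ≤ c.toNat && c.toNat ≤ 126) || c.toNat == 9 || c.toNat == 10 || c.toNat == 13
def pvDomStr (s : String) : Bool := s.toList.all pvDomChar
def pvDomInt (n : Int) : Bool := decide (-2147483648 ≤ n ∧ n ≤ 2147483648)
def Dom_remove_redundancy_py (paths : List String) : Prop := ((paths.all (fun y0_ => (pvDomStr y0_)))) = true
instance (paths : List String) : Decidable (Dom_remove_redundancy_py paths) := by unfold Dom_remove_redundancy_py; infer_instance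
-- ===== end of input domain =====

-- B keeps a path iff none of its proper prefixes occurs in a set of all paths built once,
-- replacing A's inner scan over the whole list (objective: faster on long lists of short paths).

-- ===== PORT A =====
def remove_redundancy_py (paths : List String) : List String :=
  paths.foldl
    (fun cleaned_paths path =>
      if paths.any (fun other => (other != path) && PySem.Str.startswith path other)
      then cleaned_paths
      else cleaned_paths ++ [path])
    []

-- ===== PORT B =====
def remove_redundancy_py_alt (paths : List String) : List String :=
  let present : PySem.Set String := PySem.Set.ofList paths
  paths.filter (fun p =>
    !((PySem.List.pyRange 0 (PySem.Str.len p)).any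
        (fun k => PySem.Set.contains present (PySem.Str.slice p none (some k)))))

-- ===== PRECONDITION & SPEC =====
def Spec_remove_redundancy_py (paths : List String) (out : List String) : Prop := out = remove_redundancy_py_alt paths
instance (paths : List String) (out : List String) : Decidable (Spec_remove_redundancy_py paths out) := by unfold Spec_remove_redundancy_py; infer_instance

-- ===== CLAIM (what is proved, stated in full; the proofs are below) =====
def Claim_equal_remove_redundancy_py : Prop := ∀ (paths : List String), Dom_remove_redundancy_py paths → Spec_remove_redundancy_py paths (remove_redundancy_py paths)

-- ===== LEMMAS AND PROOFS =====

-- The two per-path tests agree: "some other element ≠ p is a string prefix of p"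
-- is the same as "some proper prefix p[:k] occurs in the set of all elements".
theorem pv_key (paths : List String) (p : String) :
    (paths.any (fun other => (other != p) && PySem.Str.startswith p other))
      = ((PySem.List.pyRange 0 (PySem.Str.len p)).any
          (fun k => PySem.Set.contains (PySem.Set.ofList paths) (PySem.Str.slice p none (some k)))) := by
  apply Bool.eq_iff_iff.mpr
  simp only [List.any_eq_true]
  constructor
  · rintro ⟨other, hmem, hb⟩
    have hne : other ≠ p := by
      rcases Bool.and_eq_true .. |>.mp hb with ⟨h1, _⟩
      simpa using h1
    have hpre : other.toList <+: p.toList := by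
      rcases Bool.and_eq_true .. |>.mp hb with ⟨_, h2⟩
      rw [PySem.Str.startswith_eq] at h2
      exact (PySem.Chars.startswith_iff _ _).mp h2
    have hlt : other.toList.length < p.toList.length := by
      rcases lt_or_eq_of_le hpre.length_le with h | h
      · exact h
      · exact absurd (String.toList_inj.mp (hpre.eq_of_length h)) hne
    refine ⟨(other.toList.length : Int), ?_, ?_⟩
    · rw [PySem.List.mem_pyRange_one]
      simp [pysem]
      exact_mod_cast hlt
    · have hsl : (PySem.Str.slice p none (some (other.toList.length : Int))).toList
          = p.toList.take other.toList.length := by simp [pysem]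
      have : PySem.Str.slice p none (some (other.toList.length : Int)) = other := by
        rw [← String.toList_inj, hsl]
        exact (List.prefix_iff_eq_take.mp hpre).symm
      rw [this]
      simp [pysem, hmem]
  · rintro ⟨k, hk, hb⟩
    rw [PySem.List.mem_pyRange_one] at hk
    simp only [pysem] at hk
    obtain ⟨hk0, hklt⟩ := hk
    have hkeq : k = ((k.toNat : Nat) : Int) := (Int.toNat_of_nonneg hk0).symm
    have hsl : (PySem.Str.slice p none (some k)).toList = p.toList.take k.toNat := by
      rw [hkeq]; simp [pysem]
    have hmem : PySem.Str.slice p none (some k) ∈ paths := by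
      have := hb
      simpa [pysem] using this
    refine ⟨PySem.Str.slice p none (some k), hmem, ?_⟩
    have hlen : (PySem.Str.slice p none (some k)).toList.length < p.toList.length := by
      rw [hsl, List.length_take]
      omega
    have hne : (PySem.Str.slice p none (some k)) ≠ p := by
      intro h; rw [h] at hlen; omega
    apply Bool.and_eq_true .. |>.mpr
    constructor
    · simpa using hne
    · rw [PySem.Str.startswith_eq]
      apply (PySem.Chars.startswith_iff _ _).mpr
      rw [hsl]; exact List.take_prefix _ _

-- ===== VERDICT (by name: the statement is the Claim_ definition above) =====
theorem remove_redundancy_py_spec : Claim_equal_remove_redundancy_py := by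
  intro paths _
  show remove_redundancy_py paths = remove_redundancy_py_alt paths
  unfold remove_redundancy_py remove_redundancy_py_alt
  have hflip :
      (fun (cleaned_paths : List String) (path : String) =>
        if paths.any (fun other => (other != path) && PySem.Str.startswith path other)
        then cleaned_paths else cleaned_paths ++ [path])
      = (fun (cleaned_paths : List String) (path : String) =>
        if (!(paths.any (fun other => (other != path) && PySem.Str.startswith path other))) = true
        then cleaned_paths ++ [path] else cleaned_paths) := by
    funext acc x
    cases h : paths.any (fun other => (other != x) && PySem.Str.startswith x other) <;> simp
  rw [hflip, PySem.List.foldl_append_if _ (fun x => x)]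
  show List.map (fun x => x) _ = List.filter _ paths
  rw [List.map_id_fun']
  apply List.filter_congr
  intro p _
  rw [pv_key paths p]
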